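-- pv_equiv track=rewrite | github.com/simon987/irarchives | util.py | is_user_valid
-- ===== SOURCE A (Python) =====
-- def is_user_valid(username):
--     """ Checks if username is valid reddit name, assumes lcase/strip """
--     allowed = 'abcdefghijklmnopqrstuvwxyz1234567890_-'
--     valid = True
--     for c in username.lower():
--         if c not in allowed:
--             valid = False
--             break
--     return valid
-- ===== SOURCE B (Python) =====
-- def is_user_valid(username):
--     """ Checks if username is valid reddit name, assumes lcase/strip """
--     return username.lower().strip('abcdefghijklmnopqrstuvwxyz1234567890_-') == ''
-- ===== Notes on version B (the rewrite author's own statement) =====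
-- stated objective: idiomatic
-- what changed: Replaced the per-character membership loop (with early break) by str.strip: trim all allowed characters from both ends of the lowercased username and test that nothing remains, which is empty exactly when every character is allowed.
import Mathlib
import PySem

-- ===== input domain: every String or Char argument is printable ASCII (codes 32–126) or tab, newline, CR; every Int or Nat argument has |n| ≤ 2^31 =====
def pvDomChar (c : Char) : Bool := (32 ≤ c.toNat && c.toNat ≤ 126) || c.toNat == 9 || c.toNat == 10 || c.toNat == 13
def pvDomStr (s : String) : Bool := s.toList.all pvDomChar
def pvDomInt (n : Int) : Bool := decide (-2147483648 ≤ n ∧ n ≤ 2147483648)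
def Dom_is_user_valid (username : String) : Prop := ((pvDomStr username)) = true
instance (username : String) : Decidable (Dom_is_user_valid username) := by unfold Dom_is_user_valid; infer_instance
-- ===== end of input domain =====

-- B replaces A's per-character membership loop by str.strip(allowed)=='' : trim allowed chars from both ends and test emptiness (idiomatic rewrite, same results).


-- ===== PORT A =====
-- allowed = 'abcdefghijklmnopqrstuvwxyz1234567890_-'
def pvAllowed : List Char := "abcdefghijklmnopqrstuvwxyz1234567890_-".toList

-- 'for c in username.lower(): if c not in allowed: valid = False; break' with valid initially True
def pvLoopA : List Char → Bool
  | [] => true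
  | c :: rest => if pvAllowed.contains c = false then false else pvLoopA rest

def is_user_valid (username : String) : Bool :=
  pvLoopA (PySem.Str.lower username).toList

-- ===== PORT B =====
-- username.lower().strip(allowed) == ''  (string equality decided on the char list)
def is_user_valid_alt (username : String) : Bool :=
  (PySem.Str.stripChars (PySem.Str.lower username)
      "abcdefghijklmnopqrstuvwxyz1234567890_-").toList == []

-- ===== PRECONDITION & SPEC =====
def Spec_is_user_valid (username : String) (out : Bool) : Prop := out = is_user_valid_alt username
instance (username : String) (out : Bool) : Decidable (Spec_is_user_valid username out) := by unfold Spec_is_user_valid; infer_instance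

-- ===== CLAIM (what is proved, stated in full; the proofs are below) =====
def Claim_equal_is_user_valid : Prop := ∀ (username : String), Dom_is_user_valid username → Spec_is_user_valid username (is_user_valid username)

-- ===== LEMMAS AND PROOFS =====

-- the inner dropWhile result is all-allowed only when it is empty (its head would fail the predicate)
theorem pv_dropWhile_all (l : List Char) (p : Char → Bool)
    (h : ∀ c ∈ l.dropWhile p, p c = true) : l.dropWhile p = [] := by
  induction l with
  | nil => rfl
  | cons c rest ih =>
    by_cases hp : p c = true
    · simp only [List.dropWhile_cons, hp, if_true] at h ⊢
      exact ih h
    · simp only [List.dropWhile_cons, hp] at h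
      exact absurd (h c (by simp)) hp

theorem pvLoopA_iff (l : List Char) : pvLoopA l = true ↔ ∀ c ∈ l, c ∈ pvAllowed := by
  induction l with
  | nil => simp [pvLoopA]
  | cons c rest ih =>
    by_cases h : c ∈ pvAllowed
    · simp [pvLoopA, h, ih]
    · simp [pvLoopA, h]

-- strip(allowed) is empty exactly when every character is allowed
theorem pv_strip_empty_iff (l cs : List Char) :
    PySem.Chars.stripChars l cs = [] ↔ ∀ c ∈ l, c ∈ cs := by
  simp only [PySem.Chars.stripChars]
  constructor
  · intro h c hc
    by_contra hnc
    have h1 : l.dropWhile (fun c => decide (c ∈ cs)) ≠ [] := by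
      intro he
      exact hnc (of_decide_eq_true (List.dropWhile_eq_nil_iff.mp he c hc))
    have h3 : (l.dropWhile (fun c => decide (c ∈ cs))).reverse.dropWhile (fun c => decide (c ∈ cs)) = [] := by
      simpa using congrArg List.reverse h
    have h5 : ∀ x ∈ l.dropWhile (fun c => decide (c ∈ cs)), decide (x ∈ cs) = true := by
      intro x hx
      exact List.dropWhile_eq_nil_iff.mp h3 x (List.mem_reverse.mpr hx)
    exact h1 (pv_dropWhile_all _ _ h5)
  · intro h
    have he : l.dropWhile (fun c => decide (c ∈ cs)) = [] :=
      List.dropWhile_eq_nil_iff.mpr (fun c hc => decide_eq_true (h c hc))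
    simp [he]

-- ===== VERDICT (by name: the statement is the Claim_ definition above) =====
theorem is_user_valid_spec : Claim_equal_is_user_valid := by
  intro username _
  unfold Spec_is_user_valid is_user_valid is_user_valid_alt
  rw [PySem.Str.toList_stripChars]
  rw [Bool.eq_iff_iff, pvLoopA_iff, beq_iff_eq, pv_strip_empty_iff]
  rfl
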